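-- pv_equiv track=rewrite | github.com/reniass/Introduction-to-Computer-Science-and-Programming-Using-Python | final_exam/problem4.py | max_val
-- ===== SOURCE A (Python) =====
-- def max_val(t):
--     import string
--     digits = string.digits
--     maxValue = 0
--     s = str(t)
--     for el in range(len(s)):
--         string_number = ''
--         if s[el] in digits:
--             string_number += s[el]
--             part_s = s[el + 1:]
--             for ele in range(len(part_s)):
--                 if part_s[ele] in digits:
--                     string_number += part_s[ele]
--                 else:
--                     break
--         if string_number != '':
--             if int(string_number) > maxValue:
--                 maxValue = int(string_number)
--
--
--
--     return maxValue
-- ===== SOURCE B (Python) =====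
-- def max_val(t):
--     # single left-to-right pass over str(t), accumulating each digit run's value arithmetically
--     best = 0
--     run = 0
--     for ch in str(t):
--         if '0' <= ch <= '9':
--             run = run * 10 + (ord(ch) - 48)
--         else:
--             if run > best:
--                 best = run
--             run = 0
--     return best if best > run else run
-- ===== Notes on version B (the rewrite author's own statement) =====
-- stated objective: faster
-- what changed: A scans every digit position, copies the whole remaining suffix (s[el+1:]) and re-parses the run with int() for each; B makes one pass over str(t), accumulating each digit run's value arithmetically and keeping the running maximum.
import Mathlib
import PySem

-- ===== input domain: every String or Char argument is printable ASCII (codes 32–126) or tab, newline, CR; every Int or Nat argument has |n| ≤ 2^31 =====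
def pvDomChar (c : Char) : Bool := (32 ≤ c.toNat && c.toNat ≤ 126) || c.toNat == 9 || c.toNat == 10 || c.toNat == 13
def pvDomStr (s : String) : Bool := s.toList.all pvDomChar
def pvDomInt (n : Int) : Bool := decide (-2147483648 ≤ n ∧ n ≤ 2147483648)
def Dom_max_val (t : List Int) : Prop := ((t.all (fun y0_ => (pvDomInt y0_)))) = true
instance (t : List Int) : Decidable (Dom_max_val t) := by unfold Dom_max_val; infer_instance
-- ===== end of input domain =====

-- B replaces A's per-digit-position suffix copy + int() re-parse by one arithmetic pass over str(t).

-- shared helper: str(t) for a Python list of ints, as a list of characters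
-- ("[" + ", ".join(str(x) for x in t) + "]"); exact Python formatting.
def pyStrTail (t : List Int) : List Char :=
  match t with
  | [] => [']']
  | y :: ys => ',' :: ' ' :: (PySem.Int.toChars y ++ pyStrTail ys)

def pyStrList (t : List Int) : List Char :=
  match t with
  | [] => ['[', ']']
  | x :: xs => '[' :: (PySem.Int.toChars x ++ pyStrTail xs)

-- ===== PORT A =====
-- string.digits
def digitsA : List Char := ['0', '1', '2', '3', '4', '5', '6', '7', '8', '9']

-- inner loop: "for ele in range(len(part_s)): if digit append else break"
def innerRun : List Char → List Char
  | [] => []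
  | c :: rest => if c ∈ digitsA then c :: innerRun rest else []

-- int(sn): A only ever calls int() on a NONEMPTY ALL-DIGIT string (no sign, no
-- whitespace, no '_'); on exactly those strings int(sn) is this base-10 fold.
-- (PySem.Int.ofChars? computes the same value there; its digit parser is private,
-- so the fold is used so the proof can reason about it.)
def pyIntDigits (l : List Char) : Int :=
  l.foldl (fun a c => a * 10 + ((c.toNat : Int) - 48)) 0

def max_val (t : List Int) : Int :=
  let s := pyStrList t
  (List.range s.length).foldl (fun maxValue el =>
    let c := s.getD el ' '   -- s[el]; el < len(s) in this loop
    let string_number : List Char :=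
      if c ∈ digitsA then c :: innerRun (s.drop (el + 1)) else []
    if string_number ≠ [] then
      if pyIntDigits string_number > maxValue then pyIntDigits string_number else maxValue
    else maxValue) 0

-- ===== PORT B =====
-- '0' <= ch <= '9'
def isDig (c : Char) : Bool := decide ('0' ≤ c) && decide (c ≤ '9')

def max_val_alt (t : List Int) : Int :=
  let p := (pyStrList t).foldl
    (fun (st : Int × Int) ch =>
      if isDig ch then (st.1, st.2 * 10 + ((ch.toNat : Int) - 48))
      else (if st.2 > st.1 then st.2 else st.1, 0))
    (0, 0)
  if p.1 > p.2 then p.1 else p.2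

-- ===== PRECONDITION & SPEC =====
def Spec_max_val (t : List Int) (out : Int) : Prop := out = max_val_alt t
instance (t : List Int) (out : Int) : Decidable (Spec_max_val t out) := by unfold Spec_max_val; infer_instance

-- ===== CLAIM (what is proved, stated in full; the proofs are below) =====
def Claim_equal_max_val : Prop := ∀ (t : List Int), Dom_max_val t → Spec_max_val t (max_val t)

-- ===== LEMMAS AND PROOFS =====

-- value of the digit run at the head of l, extending an already-accumulated value r
def runV (r : Int) : List Char → Int
  | [] => r
  | c :: cs => if isDig c then runV (r * 10 + ((c.toNat : Int) - 48)) cs else r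

-- maximum digit-run value occurring in l (0 if none)
def maxRun : List Char → Int
  | [] => 0
  | c :: cs => if isDig c then max (runV ((c.toNat : Int) - 48) cs) (maxRun cs) else maxRun cs

theorem mem_digitsA_iff (c : Char) : (c ∈ digitsA) ↔ isDig c = true := by
  constructor
  · intro h
    fin_cases h <;> decide
  · intro h
    simp only [isDig, Bool.and_eq_true, decide_eq_true_eq, Char.le_def] at h
    have h48 : 48 ≤ c.val.toNat := h.1
    have h57 : c.val.toNat ≤ 57 := h.2
    have hof := Char.ofNat_toNat c
    have hcases : c.val.toNat = 48 ∨ c.val.toNat = 49 ∨ c.val.toNat = 50 ∨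
        c.val.toNat = 51 ∨ c.val.toNat = 52 ∨ c.val.toNat = 53 ∨ c.val.toNat = 54 ∨
        c.val.toNat = 55 ∨ c.val.toNat = 56 ∨ c.val.toNat = 57 := by omega
    rcases hcases with h|h|h|h|h|h|h|h|h|h <;> rw [← hof] <;>
      rw [show Char.toNat c = _ from h] <;> decide

theorem dv_nonneg (c : Char) (h : isDig c = true) : 0 ≤ (c.toNat : Int) - 48 := by
  simp only [isDig, Bool.and_eq_true, decide_eq_true_eq, Char.le_def] at h
  have : (48 : UInt32) ≤ c.val := h.1
  have : 48 ≤ c.val.toNat := this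
  simp only [Char.toNat]
  omega

theorem runV_nonneg (l : List Char) (r : Int) (hr : 0 ≤ r) : 0 ≤ runV r l := by
  induction l generalizing r with
  | nil => simpa [runV]
  | cons c cs ih =>
    simp only [runV]
    split
    · next h =>
      apply ih
      have := dv_nonneg c h
      nlinarith
    · exact hr

theorem runV_mono (l : List Char) (r r' : Int) (hr : 0 ≤ r) (h : r ≤ r') :
    runV r l ≤ runV r' l := by
  induction l generalizing r r' with
  | nil => simpa [runV]
  | cons c cs ih =>
    simp only [runV]
    split
    · next hd =>
      apply ih
      · have := dv_nonneg c hd; nlinarith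
      · nlinarith
    · exact h

theorem maxRun_nonneg (l : List Char) : 0 ≤ maxRun l := by
  induction l with
  | nil => simp [maxRun]
  | cons c cs ih =>
    simp only [maxRun]
    split
    · next h =>
      have := runV_nonneg cs _ (dv_nonneg c h)
      omega
    · exact ih

-- the run value starting at the head of l (0 accumulated) is dominated by maxRun l
theorem runV_zero_le_maxRun (l : List Char) : runV 0 l ≤ maxRun l := by
  cases l with
  | nil => simp [runV, maxRun]
  | cons c cs =>
    by_cases h : isDig c = true
    · simp only [runV, maxRun, h, if_pos]
      have : (0 : Int) * 10 + ((c.toNat : Int) - 48) = (c.toNat : Int) - 48 := by ring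
      rw [this]
      exact le_max_left _ _
    · simp only [runV, maxRun, h, if_neg, Bool.not_eq_true]
      simp [maxRun_nonneg cs]

-- ===== B side: the fold computes max best (max (runV run l) (maxRun l)) =====
theorem bfold_eq (l : List Char) (best run : Int) (hb : 0 ≤ best) (hr : 0 ≤ run) :
    (let p := l.foldl
        (fun (st : Int × Int) ch =>
          if isDig ch then (st.1, st.2 * 10 + ((ch.toNat : Int) - 48))
          else (if st.2 > st.1 then st.2 else st.1, 0))
        (best, run)
      if p.1 > p.2 then p.1 else p.2)
    = max best (max (runV run l) (maxRun l)) := by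
  induction l generalizing best run with
  | nil => simp [runV, maxRun]; omega
  | cons c cs ih =>
    by_cases h : isDig c = true
    · have hd := dv_nonneg c h
      simp only [List.foldl_cons, h, if_pos]
      rw [ih best (run * 10 + ((c.toNat : Int) - 48)) hb (by nlinarith)]
      simp only [runV, maxRun, h, if_pos]
      have h1 : runV ((c.toNat : Int) - 48) cs ≤ runV (run * 10 + ((c.toNat : Int) - 48)) cs :=
        runV_mono cs _ _ hd (by nlinarith)
      omega
    · simp only [List.foldl_cons, h, if_neg, Bool.not_eq_true]
      rw [show (if run > best then run else best) = max best run by omega]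
      rw [ih (max best run) 0 (by omega) le_rfl]
      simp only [runV, maxRun, h, if_neg, Bool.not_eq_true]
      have h1 := runV_zero_le_maxRun cs
      omega

-- ===== A side =====
theorem innerRun_eq_takeWhile (l : List Char) : innerRun l = l.takeWhile isDig := by
  induction l with
  | nil => rfl
  | cons c cs ih =>
    by_cases h : isDig c = true
    · simp [innerRun, h, (mem_digitsA_iff c).mpr h, ih]
    · have hm : ¬ c ∈ digitsA := fun hc => h ((mem_digitsA_iff c).mp hc)
      simp [innerRun, h, hm]

-- folding the digit fold over an all-digit list is runV
theorem foldl_eq_runV (l : List Char) (r : Int) (h : ∀ c ∈ l, isDig c = true) :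
    l.foldl (fun a c => a * 10 + ((c.toNat : Int) - 48)) r = runV r l := by
  induction l generalizing r with
  | nil => rfl
  | cons c cs ih =>
    have hc : isDig c = true := h c (by simp)
    simp only [List.foldl_cons, runV, hc, if_pos]
    exact ih _ (fun c' hc' => h c' (by simp [hc']))

theorem pyIntDigits_cons_takeWhile (c : Char) (cs : List Char) :
    pyIntDigits (c :: cs.takeWhile isDig) = runV ((c.toNat : Int) - 48) (cs.takeWhile isDig) := by
  simp only [pyIntDigits, List.foldl_cons]
  rw [foldl_eq_runV _ _ (fun c' hc' => List.mem_takeWhile_imp hc')]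
  norm_num

-- runV through a takeWhile prefix equals runV on the whole list
theorem runV_takeWhile (l : List Char) (r : Int) :
    runV r (l.takeWhile isDig) = runV r l := by
  induction l generalizing r with
  | nil => rfl
  | cons c cs ih =>
    by_cases h : isDig c = true
    · simp [h, runV, ih]
    · simp [h, runV]

-- A's outer loop over range(len s), as a function of s and the accumulator
def aStep (s : List Char) (maxValue : Int) (el : Nat) : Int :=
  let c := s.getD el ' '
  let string_number : List Char :=
    if c ∈ digitsA then c :: innerRun (s.drop (el + 1)) else []
  if string_number ≠ [] then
    if pyIntDigits string_number > maxValue then pyIntDigits string_number else maxValue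
  else maxValue

theorem max_val_eq_aStep_fold (t : List Int) :
    max_val t = (List.range (pyStrList t).length).foldl (aStep (pyStrList t)) 0 := rfl

theorem aStep_shift (c : Char) (cs : List Char) (m : Int) (el : Nat) :
    aStep (c :: cs) m (el + 1) = aStep cs m el := by
  simp [aStep]

theorem aStep_zero (c : Char) (cs : List Char) (m : Int) :
    aStep (c :: cs) m 0 =
      if isDig c then max m (runV ((c.toNat : Int) - 48) cs) else m := by
  by_cases h : isDig c = true
  · simp only [aStep, List.getD_cons_zero, (mem_digitsA_iff c).mpr h, if_pos,
      List.drop_succ_cons, List.drop_zero, innerRun_eq_takeWhile]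
    rw [if_pos (by simp)]
    rw [pyIntDigits_cons_takeWhile c cs, runV_takeWhile]
    simp only [h, if_pos]
    omega
  · have hm' : ¬ c ∈ digitsA := fun hc => h ((mem_digitsA_iff c).mp hc)
    simp [aStep, hm', h]

theorem afold_eq (s : List Char) (m : Int) (hm : 0 ≤ m) :
    (List.range s.length).foldl (aStep s) m = max m (maxRun s) := by
  induction s generalizing m with
  | nil => simp [maxRun]; omega
  | cons c cs ih =>
    rw [List.length_cons, List.range_succ_eq_map, List.foldl_cons, List.foldl_map]
    have hstep : ∀ (m' : Int) (el : Nat), aStep (c :: cs) m' (el + 1) = aStep cs m' el :=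
      fun m' el => aStep_shift c cs m' el
    simp only [Nat.succ_eq_add_one, hstep]
    rw [aStep_zero c cs m]
    by_cases h : isDig c = true
    · simp only [h, if_pos]
      rw [ih _ (by have := runV_nonneg cs _ (dv_nonneg c h); omega)]
      simp only [maxRun, h, if_pos]
      omega
    · simp only [h, if_neg, Bool.not_eq_true]
      rw [ih _ hm]
      simp only [maxRun, h, Bool.false_eq_true, if_false]

-- ===== VERDICT (by name: the statement is the Claim_ definition above) =====
theorem max_val_spec : Claim_equal_max_val := by
  intro t _
  unfold Spec_max_val
  have hA : max_val t = maxRun (pyStrList t) := by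
    rw [max_val_eq_aStep_fold, afold_eq _ 0 le_rfl]
    have := maxRun_nonneg (pyStrList t)
    omega
  have hB : max_val_alt t = maxRun (pyStrList t) := by
    have := bfold_eq (pyStrList t) 0 0 le_rfl le_rfl
    simp only [max_val_alt]
    rw [this]
    have h1 := runV_zero_le_maxRun (pyStrList t)
    have h2 := maxRun_nonneg (pyStrList t)
    omega
  rw [hA, hB]
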